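-- pv_equiv track=rewrite | github.com/LeeDayday/programmers | src/python/30-77885.py | solution
-- ===== SOURCE A (Python) =====
-- def solution(numbers):
--     answer = []
--     for number in numbers:
--         if number % 2:
--             binary = bin(number)[2:]  # 2진수 변환 ('0b' 제거)
--             if '0' in binary:
--                 # 1. 가장 오른쪽의 '0'을 '1'로 바꾸고, 그 뒤의 '1'을 '0'으로 변경
--                 index = binary.rfind('0')  # 가장 오른쪽 '0' 찾기
--                 new_binary = binary[:index] + '10' + binary[index+2:]
--             else:
--                 # 2. '0'이 없는 경우 (예: 7 -> '111' -> '1011')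
--                 new_binary = '10' + binary[1:]  # 맨 앞에 '10' 추가
--             answer.append(int(new_binary, 2))  # 10진수 변환 후 추가
--
--         # 짝수의 경우, 최하위 비트가 항상 0
--         # 따라서 f(x) = x + 1 만족
--         else:
--             answer.append(number + 1)
--     return answer
-- ===== SOURCE B (Python) =====
-- def solution(numbers):
--     # odd n: add 2^(t-1) where 2^t is the lowest set bit of n+1 (t = number of
--     # trailing 1-bits of n); pure integer arithmetic, no string round-trip.
--     return [n + 1 if n % 2 == 0 else n + ((n + 1) & -(n + 1)) // 2 for n in numbers]
-- ===== Notes on version B (the rewrite author's own statement) =====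
-- stated objective: simpler
-- what changed: The odd branch's bin()/rfind/string-slice/int(.,2) round-trip is replaced by the closed-form bit trick n + ((n+1) & -(n+1)) // 2, and the append loop by a list comprehension.
-- intended difference: On lists containing a negative odd number (inside Pre_ these are exactly -1, -3, -7, ... = -(2^k-1)) A pipes bin()'s '-0b' prefix into its string surgery and returns a spurious positive value (e.g. -3 -> 11), while B returns the uniform bit-trick value (-3 -> -2), the consistent extension of the intended mapping. — e.g. on solution([-3]): A returns [11], B returns [-2]
import Mathlib
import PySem

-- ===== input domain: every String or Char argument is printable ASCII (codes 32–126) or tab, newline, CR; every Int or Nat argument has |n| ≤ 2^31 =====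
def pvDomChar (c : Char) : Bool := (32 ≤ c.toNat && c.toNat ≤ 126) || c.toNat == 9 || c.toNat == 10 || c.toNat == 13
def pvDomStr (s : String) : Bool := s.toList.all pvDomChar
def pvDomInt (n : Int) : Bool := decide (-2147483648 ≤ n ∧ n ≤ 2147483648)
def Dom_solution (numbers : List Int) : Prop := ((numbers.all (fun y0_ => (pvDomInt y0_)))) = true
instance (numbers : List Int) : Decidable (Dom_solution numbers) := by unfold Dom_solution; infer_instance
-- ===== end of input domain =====

-- B replaces A's odd-branch bin()/rfind/slice/int(.,2) string round-trip by the closed-form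
-- bit trick n + ((n+1) & -(n+1)) // 2 (objective: simpler); on negative odd inputs A's string
-- surgery raises or returns spurious values — see Pre_/Raises_/D_ below.

-- ===== PORT A =====
-- bin(n)'s digit part, MSB first (fuel-structured exactly like core's Nat.toDigits loop)
def pvBitsAux : Nat → Nat → List Char
  | 0, _ => []
  | f+1, n => if n < 2 then [Nat.digitChar n] else pvBitsAux f (n/2) ++ [Nat.digitChar (n%2)]

def pvBits (n : Nat) : List Char := pvBitsAux (n+1) n

-- bin(number)[2:] : for number < 0 Python leaves 'b' ++ digits (the '-0b' prefix minus two chars)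
def pvBinTail (n : Int) : List Char := if n < 0 then 'b' :: pvBits n.natAbs else pvBits n.toNat

-- int(s, 2): exact on strings of binary digits, which is all this port feeds it inside Pre_
def pvParseBin (cs : List Char) : Int := cs.foldl (fun a c => 2*a + (if c = '1' then 1 else 0)) 0

def solution (numbers : List Int) : List Int :=
  numbers.foldl
    (fun answer number =>
      if number % 2 ≠ 0 then
        let binary := pvBinTail number
        if '0' ∈ binary then
          -- binary.rfind('0'); '0' ∈ binary, so the index is in range
          let index := binary.length - 1 - binary.reverse.idxOf '0'
          answer ++ [pvParseBin (binary.take index ++ ['1', '0'] ++ binary.drop (index+2))]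
        else
          answer ++ [pvParseBin ('1' :: '0' :: binary.drop 1)]
      else answer ++ [number + 1])
    []

-- ===== PORT B =====
def solution_alt (numbers : List Int) : List Int :=
  numbers.map (fun n =>
    if n % 2 = 0 then n + 1
    else n + PySem.Int.floordiv (PySem.Int.band (n+1) (-(n+1))) 2)

-- ===== PRECONDITION & SPEC =====
-- Pre_ excludes exactly the inputs on which A raises ValueError: a negative odd element whose
-- absolute value is not all ones in binary (|n| &&& (|n|+1) ≠ 0) leaves the 'b' of bin()'s
-- '-0b' prefix inside the string handed to int(., 2).
def Pre_solution (numbers : List Int) : Prop :=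
  ∀ n ∈ numbers, n % 2 = 1 → n < 0 → n.natAbs &&& (n.natAbs + 1) = 0
instance (numbers : List Int) : Decidable (Pre_solution numbers) := by unfold Pre_solution; infer_instance
def pvWitness_solution : List Int := [1, 2, 7, -4]

-- On lists containing a negative odd number (inside Pre_: exactly -(2^k-1)) A pipes bin()'s
-- '-0b' prefix into its string surgery and returns a spurious positive value (e.g. -3 -> 11),
-- while B returns the uniform bit-trick value (-3 -> -2), the consistent extension of the
-- intended mapping.
def D_solution (numbers : List Int) : Prop := ∃ n ∈ numbers, n % 2 = 1 ∧ n < 0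
instance (numbers : List Int) : Decidable (D_solution numbers) := by unfold D_solution; infer_instance

def Spec_solution (numbers : List Int) (out : List Int) : Prop :=
  ¬ D_solution numbers → out = solution_alt numbers
instance (numbers : List Int) (out : List Int) : Decidable (Spec_solution numbers out) := by unfold Spec_solution; infer_instance

def pvDiffWitness_solution : List Int := [-3]
def pvDiffWitnessOut_solution : (List Int) × (List Int) := ([11], [-2])

-- ===== CLAIM (what is proved, stated in full; the proofs are below) =====
def Claim_unchanged_solution : Prop := ∀ (numbers : List Int), Dom_solution numbers → Pre_solution numbers → Spec_solution numbers (solution numbers)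
def Claim_changed_solution : Prop := Dom_solution (pvDiffWitness_solution) ∧ Pre_solution (pvDiffWitness_solution) ∧ D_solution (pvDiffWitness_solution) ∧ solution (pvDiffWitness_solution) = pvDiffWitnessOut_solution.1 ∧ solution_alt (pvDiffWitness_solution) = pvDiffWitnessOut_solution.2 ∧ pvDiffWitnessOut_solution.1 ≠ pvDiffWitnessOut_solution.2

-- ===== LEMMAS AND PROOFS =====

-- the value A's odd branch computes from the sliced binary string
def pvOddVal (binary : List Char) : Int :=
  if '0' ∈ binary then
    pvParseBin (binary.take (binary.length - 1 - binary.reverse.idxOf '0') ++ ['1', '0'] ++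
      binary.drop ((binary.length - 1 - binary.reverse.idxOf '0') + 2))
  else pvParseBin ('1' :: '0' :: binary.drop 1)

-- A's per-element value
def pvElemA (n : Int) : Int := if n % 2 ≠ 0 then pvOddVal (pvBinTail n) else n + 1

-- B's per-element value
def pvElemB (n : Int) : Int :=
  if n % 2 = 0 then n + 1
  else n + PySem.Int.floordiv (PySem.Int.band (n+1) (-(n+1))) 2

theorem pvBitsAux_irrel : ∀ (f g n : Nat), n < f → n < g → pvBitsAux f n = pvBitsAux g n := by
  intro f
  induction f with
  | zero => intro g n h; omega
  | succ f ih =>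
    intro g n hf hg
    cases g with
    | zero => omega
    | succ g =>
      simp only [pvBitsAux]
      by_cases h2 : n < 2
      · simp [h2]
      · simp only [if_neg h2]
        rw [ih g (n/2) (by omega) (by omega)]

theorem pvBits_def (n : Nat) :
    pvBits n = if n < 2 then [Nat.digitChar n] else pvBits (n/2) ++ [Nat.digitChar (n%2)] := by
  by_cases h : n < 2
  · simp [pvBits, pvBitsAux, h]
  · rw [if_neg h]
    have h1 : pvBits n = pvBitsAux n (n/2) ++ [Nat.digitChar (n%2)] := by
      unfold pvBits
      simp only [pvBitsAux]
      rw [if_neg h]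
    rw [h1, pvBitsAux_irrel n (n/2+1) (n/2) (by omega) (by omega)]
    rfl

theorem pvBits_two_mul {m : Nat} (h : 1 ≤ m) : pvBits (2*m) = pvBits m ++ ['0'] := by
  rw [pvBits_def]
  have h1 : ¬ 2*m < 2 := by omega
  have h2 : 2*m/2 = m := by omega
  have h3 : 2*m%2 = 0 := by omega
  have h4 : Nat.digitChar 0 = '0' := by decide
  simp [h1, h2, h3, h4]

theorem pvBits_two_mul_add_one {m : Nat} (h : 1 ≤ m) : pvBits (2*m+1) = pvBits m ++ ['1'] := by
  rw [pvBits_def]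
  have h1 : ¬ 2*m+1 < 2 := by omega
  have h2 : (2*m+1)/2 = m := by omega
  have h3 : (2*m+1)%2 = 1 := by omega
  have h4 : Nat.digitChar 1 = '1' := by decide
  simp [h1, h2, h3, h4]

theorem pvBits_odd_concat {k : Nat} (h : k % 2 = 1) : ∃ X, pvBits k = X ++ ['1'] := by
  obtain ⟨j, rfl⟩ : ∃ j, k = 2*j+1 := ⟨k/2, by omega⟩
  rcases Nat.eq_zero_or_pos j with rfl | hj
  · exact ⟨[], by decide⟩
  · exact ⟨pvBits j, pvBits_two_mul_add_one hj⟩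

theorem pvParseBin_append_singleton (L : List Char) (c : Char) :
    pvParseBin (L ++ [c]) = 2 * pvParseBin L + (if c = '1' then 1 else 0) := by
  unfold pvParseBin
  rw [List.foldl_append]
  simp [List.foldl]

theorem pvParseBin_roundtrip : ∀ k : Nat, pvParseBin (pvBits k) = (k : Int) := by
  intro k
  induction k using Nat.strong_induction_on with
  | _ k ih =>
    rw [pvBits_def]
    by_cases h : k < 2
    · interval_cases k <;> decide
    · rw [if_neg h, pvParseBin_append_singleton, ih (k/2) (by omega)]
      have h2 : k % 2 = 0 ∨ k % 2 = 1 := by omega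
      rcases h2 with h2 | h2
      · rw [h2, if_neg (by decide : ¬ (Nat.digitChar 0 = '1'))]; omega
      · rw [h2, if_pos (by decide : Nat.digitChar 1 = '1')]; omega

theorem pvLand_two_mul_add_one (a b : Nat) : (2*a) &&& (2*b+1) = 2*(a &&& b) := by
  have := Nat.bitwise_bit (f := and) (a := false) (m := a) (b := true) (n := b)
  simp [Nat.bit] at this
  simpa [HAnd.hAnd, AndOp.and, Nat.land] using this

theorem pvOddVal_concat_one {k : Nat} (h : k % 2 = 1) :
    pvOddVal (pvBits k ++ ['1']) = 2 * pvOddVal (pvBits k) + 1 := by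
  obtain ⟨X, hX⟩ := pvBits_odd_concat h
  by_cases h0 : '0' ∈ pvBits k
  · have h0' : '0' ∈ pvBits k ++ ['1'] := List.mem_append_left _ h0
    have hidx : (pvBits k ++ ['1']).reverse.idxOf '0' = (pvBits k).reverse.idxOf '0' + 1 := by
      simp
    have hlt : (pvBits k).reverse.idxOf '0' < (pvBits k).length := by
      simpa using List.idxOf_lt_length_of_mem (List.mem_reverse.mpr h0)
    have hge : 1 ≤ (pvBits k).reverse.idxOf '0' := by
      rw [hX]
      simp
    set idx := (pvBits k).reverse.idxOf '0' with hidxdef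
    set L := (pvBits k).length with hLdef
    unfold pvOddVal
    rw [if_pos h0', if_pos h0]
    have hlen : (pvBits k ++ ['1']).length = L + 1 := by rw [hLdef]; simp
    rw [hidx, hlen]
    have him : L + 1 - 1 - (idx + 1) = L - 1 - idx := by omega
    rw [him]
    have ht : (pvBits k ++ ['1']).take (L - 1 - idx) = (pvBits k).take (L - 1 - idx) :=
      List.take_append_of_le_length (by omega)
    have hd : (pvBits k ++ ['1']).drop ((L - 1 - idx) + 2) = (pvBits k).drop ((L - 1 - idx) + 2) ++ ['1'] :=
      List.drop_append_of_le_length (by omega)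
    rw [ht, hd]
    rw [show (pvBits k).take (L-1-idx) ++ ['1','0'] ++ ((pvBits k).drop ((L-1-idx)+2) ++ ['1'])
        = ((pvBits k).take (L-1-idx) ++ ['1','0'] ++ (pvBits k).drop ((L-1-idx)+2)) ++ ['1'] from by simp]
    rw [pvParseBin_append_singleton]
    norm_num
    rw [hidxdef, hLdef]
  · have h0' : '0' ∉ pvBits k ++ ['1'] := by
      intro hc
      rcases List.mem_append.mp hc with h' | h'
      · exact h0 h'
      · simp at h'
    unfold pvOddVal
    rw [if_neg h0', if_neg h0]
    obtain ⟨c, cs, hcons⟩ : ∃ c cs, pvBits k = c :: cs := by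
      cases hpv : pvBits k with
      | nil => rw [hpv] at hX; simp at hX
      | cons c cs => exact ⟨c, cs, rfl⟩
    rw [hcons]
    rw [show ((c :: cs) ++ ['1']) = c :: (cs ++ ['1']) from by simp]
    simp only [List.drop_succ_cons, List.drop_zero]
    rw [show ('1'::'0'::(cs ++ ['1'])) = ('1'::'0'::cs) ++ ['1'] from by simp]
    rw [pvParseBin_append_singleton]
    norm_num

theorem pvOddVal_zero_one (Y : List Char) :
    pvOddVal ((Y ++ ['0']) ++ ['1']) = pvParseBin (Y ++ ['1', '0']) := by
  have h0 : '0' ∈ (Y ++ ['0']) ++ ['1'] := by simp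
  unfold pvOddVal
  rw [if_pos h0]
  have hrev : ((Y ++ ['0']) ++ ['1']).reverse = '1'::'0'::Y.reverse := by simp
  have hidx : ((Y ++ ['0']) ++ ['1']).reverse.idxOf '0' = 1 := by
    rw [hrev]; simp
  have hlen : ((Y ++ ['0']) ++ ['1']).length = Y.length + 2 := by simp
  rw [hidx, hlen]
  have him : Y.length + 2 - 1 - 1 = Y.length := by omega
  rw [him]
  have ht : ((Y ++ ['0']) ++ ['1']).take Y.length = Y := by
    rw [List.take_append_of_le_length (by simp), List.take_append_of_le_length (le_refl _),
      List.take_length]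
  have hd : ((Y ++ ['0']) ++ ['1']).drop (Y.length + 2) = [] := by
    apply List.drop_eq_nil_of_le
    simp
  rw [ht, hd, List.append_nil]

theorem pvOddVal_bits : ∀ m : Nat, m % 2 = 1 →
    pvOddVal (pvBits m) = (m : Int) + (((m+1) - ((m+1) &&& m)) / 2 : Nat) := by
  intro m
  induction m using Nat.strong_induction_on with
  | _ m ih =>
    intro hm
    obtain ⟨b, rfl⟩ : ∃ b, m = 2*b+1 := ⟨m/2, by omega⟩
    have hland : (2*b+1+1) &&& (2*b+1) = 2*((b+1) &&& b) := by
      have h1 := pvLand_two_mul_add_one (b+1) b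
      rw [show 2*(b+1) = 2*b+1+1 from by ring] at h1
      exact h1
    have hle : (b+1) &&& b ≤ b+1 := Nat.and_le_left
    have hdiv : ((2*b+1+1) - ((2*b+1+1) &&& (2*b+1))) / 2 = (b+1) - ((b+1) &&& b) := by
      rw [hland]; omega
    rw [hdiv]
    rcases Nat.eq_zero_or_pos b with rfl | hb
    · decide
    · have hb2 : b % 2 = 0 ∨ b % 2 = 1 := by omega
      rcases hb2 with hb2 | hb2
      · -- m = 4c+1 : rightmost zero is the next-to-last digit, A adds one
        obtain ⟨c, rfl⟩ : ∃ c, b = 2*c := ⟨b/2, by omega⟩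
        have hc : 1 ≤ c := by omega
        have h1 : (2*c+1) &&& (2*c) = 2*c := by
          rw [Nat.and_comm]
          have h2 := pvLand_two_mul_add_one c c
          rw [Nat.and_self] at h2
          exact h2
        have hbits : pvBits (2*(2*c)+1) = (pvBits c ++ ['0']) ++ ['1'] := by
          rw [pvBits_two_mul_add_one (by omega), pvBits_two_mul hc]
        rw [hbits, pvOddVal_zero_one]
        rw [show pvBits c ++ ['1','0'] = (pvBits c ++ ['1']) ++ ['0'] from by simp]
        rw [pvParseBin_append_singleton, pvParseBin_append_singleton, pvParseBin_roundtrip]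
        rw [h1]
        norm_num
        push_cast
        ring
      · -- m = 2b+1, b odd : peel the trailing 1 and recurse
        have ihb := ih b (by omega) hb2
        have hbits : pvBits (2*b+1) = pvBits b ++ ['1'] := pvBits_two_mul_add_one hb
        rw [hbits, pvOddVal_concat_one hb2, ihb]
        obtain ⟨j, rfl⟩ : ∃ j, b = 2*j+1 := ⟨b/2, by omega⟩
        have h2 : (2*j+1+1) &&& (2*j+1) = 2*((j+1) &&& j) := by
          have h3 := pvLand_two_mul_add_one (j+1) j
          rw [show 2*(j+1) = 2*j+1+1 from by ring] at h3
          exact h3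
        have hle2 : (j+1) &&& j ≤ j+1 := Nat.and_le_left
        rw [h2]
        have h4 : (2*j+1+1) - 2*((j+1) &&& j) = 2*((j+1) - ((j+1) &&& j)) := by omega
        have h5 : (2*((j+1) - ((j+1) &&& j))) / 2 = (j+1) - ((j+1) &&& j) := by omega
        push_cast
        omega

theorem pvBand_pos (m : Nat) :
    PySem.Int.band ((m:Int)+1) (-((m:Int)+1)) = (((m+1) - ((m+1) &&& m) : Nat) : Int) := by
  rw [PySem.Int.band.eq_1]
  have h1 : (0:Int) ≤ (m:Int)+1 := by positivity
  have h2 : ¬ (0:Int) ≤ -((m:Int)+1) := by omega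
  simp only [if_pos h1, if_neg h2]
  norm_num

theorem pvElem_eq (n : Int) (h : ¬ (n % 2 = 1 ∧ n < 0)) : pvElemA n = pvElemB n := by
  by_cases h0 : n % 2 = 0
  · simp [pvElemA, pvElemB, h0]
  · have h1 : n % 2 = 1 := by omega
    have hn : 0 ≤ n := by
      by_contra hneg
      exact h ⟨h1, by omega⟩
    obtain ⟨m, rfl⟩ : ∃ m : Nat, n = (m : Int) := ⟨n.toNat, by omega⟩
    have hm : m % 2 = 1 := by omega
    obtain ⟨b, rfl⟩ : ∃ b, m = 2*b+1 := ⟨m/2, by omega⟩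
    have hland : (2*b+1+1) &&& (2*b+1) = 2*((b+1) &&& b) := by
      have h2 := pvLand_two_mul_add_one (b+1) b
      rw [show 2*(b+1) = 2*b+1+1 from by ring] at h2
      exact h2
    have hle : (b+1) &&& b ≤ b+1 := Nat.and_le_left
    have hx : (2*b+1+1) - ((2*b+1+1) &&& (2*b+1)) = 2*((b+1) - ((b+1) &&& b)) := by
      rw [hland]; omega
    have hA : pvElemA ((2*b+1 : Nat) : Int) = pvOddVal (pvBits (2*b+1)) := by
      unfold pvElemA pvBinTail
      rw [if_pos (show ((2*b+1 : Nat) : Int) % 2 ≠ 0 from h0)]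
      rw [if_neg (show ¬ ((2*b+1 : Nat) : Int) < 0 from by omega)]
      rw [Int.toNat_natCast]
    have hB : pvElemB ((2*b+1 : Nat) : Int)
        = ((2*b+1 : Nat) : Int) + (((b+1) - ((b+1) &&& b) : Nat) : Int) := by
      unfold pvElemB
      rw [if_neg h0, pvBand_pos (2*b+1), hx]
      have hfd : PySem.Int.floordiv ((2*((b+1) - ((b+1) &&& b)) : Nat) : Int) 2
          = (((b+1) - ((b+1) &&& b) : Nat) : Int) := by
        simp [PySem.Int.floordiv]
      rw [hfd]
    rw [hA, hB, pvOddVal_bits (2*b+1) hm, hx]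
    have h5 : (2*((b+1) - ((b+1) &&& b))) / 2 = (b+1) - ((b+1) &&& b) := by omega
    rw [h5]

theorem pvBody_eq : (fun (answer : List Int) (number : Int) =>
      if number % 2 ≠ 0 then
        let binary := pvBinTail number
        if '0' ∈ binary then
          let index := binary.length - 1 - binary.reverse.idxOf '0'
          answer ++ [pvParseBin (binary.take index ++ ['1', '0'] ++ binary.drop (index+2))]
        else
          answer ++ [pvParseBin ('1' :: '0' :: binary.drop 1)]
      else answer ++ [number + 1]) = (fun answer number => answer ++ [pvElemA number]) := by
  funext answer number
  simp only [pvElemA, pvOddVal]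
  split_ifs <;> simp

theorem pvFoldl_append : ∀ (xs acc : List Int),
    xs.foldl (fun a n => a ++ [pvElemA n]) acc = acc ++ xs.map pvElemA := by
  intro xs
  induction xs with
  | nil => simp
  | cons x xs ih => intro acc; rw [List.foldl_cons, ih]; simp

theorem pvSolution_eq_map (numbers : List Int) : solution numbers = numbers.map pvElemA := by
  unfold solution
  rw [pvBody_eq, pvFoldl_append, List.nil_append]

-- ===== VERDICT (by name: the statement is the Claim_ definition above) =====
theorem solution_spec : Claim_unchanged_solution := by
  intro numbers _ _ hnD
  rw [pvSolution_eq_map]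
  unfold solution_alt
  apply List.map_congr_left
  intro n hn
  have hnd : ¬ (n % 2 = 1 ∧ n < 0) := fun h => hnD ⟨n, hn, h.1, h.2⟩
  exact pvElem_eq n hnd

theorem solution_changed : Claim_changed_solution := by
  unfold Claim_changed_solution; decide
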